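-- pv_equiv track=rewrite | github.com/Classicalqy/zhuangzi | rebuild_zhuangzi_tables.py | merge_interpretation_segments
-- ===== SOURCE A (Python) =====
-- from typing import Dict, List, Literal, Tuple
--
-- def merge_interpretation_segments(cells: List[Tuple[int, str]]) -> List[Tuple[int, int, str]]:
--     if not cells:
--         return []
--
--     cells = sorted(cells, key=lambda x: x[0])
--     segments: List[Tuple[int, int, str]] = []
--     start_sid, prev_sid = cells[0][0], cells[0][0]
--     texts = [cells[0][1]]
--
--     for sid, txt in cells[1:]:
--         if sid == prev_sid + 1:
--             texts.append(txt)
--             prev_sid = sid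
--             continue
--         segments.append((start_sid, prev_sid, "\n".join(texts)))
--         start_sid = sid
--         prev_sid = sid
--         texts = [txt]
--
--     segments.append((start_sid, prev_sid, "\n".join(texts)))
--     return segments
-- ===== SOURCE B (Python) =====
-- from typing import Dict, List, Literal, Tuple
--
-- def merge_interpretation_segments(cells: List[Tuple[int, str]]) -> List[Tuple[int, int, str]]:
--     # Build segments back-to-front: walk the sorted cells in reverse and either
--     # extend the current leading segment (when ids are consecutive) or open a new one.
--     segs: List[Tuple[int, int, str]] = []
--     for sid, txt in reversed(sorted(cells, key=lambda x: x[0])):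
--         if segs and segs[0][0] == sid + 1:
--             _, end, text = segs[0]
--             segs[0] = (sid, end, txt + "\n" + text)
--         else:
--             segs.insert(0, (sid, sid, txt))
--     return segs
-- ===== Notes on version B (the rewrite author's own statement) =====
-- stated objective: alternative
-- what changed: Replaces A's forward stateful pass (accumulating start/prev/texts and flushing a segment at each break) by a single reversed pass that builds the segment list back-to-front, either merging the cell into the current head segment when ids are consecutive or prepending a fresh one-cell segment.
import Mathlib
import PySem

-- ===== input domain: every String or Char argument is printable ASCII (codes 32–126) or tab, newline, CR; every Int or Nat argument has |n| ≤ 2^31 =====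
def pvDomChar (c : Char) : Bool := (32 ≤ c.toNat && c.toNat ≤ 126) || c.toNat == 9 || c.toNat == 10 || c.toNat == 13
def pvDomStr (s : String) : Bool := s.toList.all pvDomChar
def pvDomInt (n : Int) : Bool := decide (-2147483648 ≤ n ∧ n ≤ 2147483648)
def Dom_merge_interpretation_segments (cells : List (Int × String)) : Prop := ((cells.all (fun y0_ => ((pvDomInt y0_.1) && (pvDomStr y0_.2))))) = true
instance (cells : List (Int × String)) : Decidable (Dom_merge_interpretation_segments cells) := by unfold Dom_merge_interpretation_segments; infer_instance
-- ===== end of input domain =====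

-- B builds the segment list back-to-front (a reversed pass that merges into the head
-- segment) instead of A's forward stateful accumulator; objective: alternative decomposition.

-- ===== PORT A =====
-- "\n".join(texts)
def pvJoinNL (texts : List String) : String := PySem.Str.join "\n" texts

-- the for-loop of A: state (segments, start_sid, prev_sid, texts), one step per cell
def pvGoA (segs : List (Int × Int × String)) (start prev : Int) (texts : List String) :
    List (Int × String) → List (Int × Int × String)
  | [] => segs ++ [(start, prev, pvJoinNL texts)]
  | (sid, txt) :: rest =>
    if sid = prev + 1 then pvGoA segs start sid (texts ++ [txt]) rest
    else pvGoA (segs ++ [(start, prev, pvJoinNL texts)]) sid sid [txt] rest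

def merge_interpretation_segments (cells : List (Int × String)) : List (Int × Int × String) :=
  if cells = [] then []
  else
    match PySem.List.sorted cells (fun x => x.1) false with
    | [] => []
    | (id0, t0) :: rest => pvGoA [] id0 id0 [t0] rest

-- ===== PORT B =====
-- one reversed-iteration step of B: merge into the current head segment or open a new one
def pvStepB (sid : Int) (txt : String) (segs : List (Int × Int × String)) : List (Int × Int × String) :=
  match segs with
  | (a, b, t) :: rest =>
    if a = sid + 1 then (sid, b, txt ++ "\n" ++ t) :: rest
    else (sid, sid, txt) :: (a, b, t) :: rest
  | [] => [(sid, sid, txt)]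

def merge_interpretation_segments_alt (cells : List (Int × String)) : List (Int × Int × String) :=
  (PySem.List.sorted cells (fun x => x.1) false).foldr (fun c segs => pvStepB c.1 c.2 segs) []

-- ===== PRECONDITION & SPEC =====
def Spec_merge_interpretation_segments (cells : List (Int × String)) (out : List (Int × Int × String)) : Prop := out = merge_interpretation_segments_alt cells
instance (cells : List (Int × String)) (out : List (Int × Int × String)) : Decidable (Spec_merge_interpretation_segments cells out) := by unfold Spec_merge_interpretation_segments; infer_instance

-- ===== CLAIM (what is proved, stated in full; the proofs are below) =====
def Claim_equal_merge_interpretation_segments : Prop := ∀ (cells : List (Int × String)), Dom_merge_interpretation_segments cells → Spec_merge_interpretation_segments cells (merge_interpretation_segments cells)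

-- ===== LEMMAS AND PROOFS =====

-- A's open segment (start, prev, joined-text) attached in front of an already-built segment list
def pvAttach (start prev : Int) (jt : String) (segs : List (Int × Int × String)) : List (Int × Int × String) :=
  match segs with
  | (a, b, t) :: r =>
    if a = prev + 1 then (start, b, jt ++ "\n" ++ t) :: r
    else (start, prev, jt) :: (a, b, t) :: r
  | [] => [(start, prev, jt)]

theorem pvCharsJoin_append (sep : List Char) (xs : List (List Char)) (y : List Char) (h : xs ≠ []) :
    PySem.Chars.join sep (xs ++ [y]) = PySem.Chars.join sep xs ++ sep ++ y := by
  induction xs with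
  | nil => exact absurd rfl h
  | cons a l ih =>
    cases l with
    | nil => simp [PySem.Chars.join_cons_cons, PySem.Chars.join_singleton]
    | cons b m =>
      have h2 : ((a :: b :: m) ++ [y]) = a :: ((b :: m) ++ [y]) := by simp
      rw [h2]
      have h3 : ((b :: m) ++ [y]) = b :: (m ++ [y]) := by simp
      rw [h3, PySem.Chars.join_cons_cons, ← h3, ih (by simp), PySem.Chars.join_cons_cons]
      simp [List.append_assoc]

theorem pvJoinNL_singleton (t : String) : pvJoinNL [t] = t := by
  apply String.toList_inj.mp
  rw [pvJoinNL, PySem.Str.toList_join]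
  simp [PySem.Chars.join_singleton]

theorem pvJoinNL_append (texts : List String) (txt : String) (h : texts ≠ []) :
    pvJoinNL (texts ++ [txt]) = pvJoinNL texts ++ "\n" ++ txt := by
  apply String.toList_inj.mp
  simp only [pvJoinNL, PySem.Str.toList_join, String.toList_append, List.map_append,
    List.map_cons, List.map_nil]
  rw [pvCharsJoin_append _ _ _ (by simpa using h)]

theorem pvStepB_eq_attach (sid : Int) (txt : String) (segs : List (Int × Int × String)) :
    pvStepB sid txt segs = pvAttach sid sid txt segs := by
  cases segs with
  | nil => rfl
  | cons hd tl => rfl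

theorem pvAttach_merge (start prev : Int) (jt txt : String) (F : List (Int × Int × String)) :
    pvAttach start prev jt (pvStepB (prev + 1) txt F) =
      pvAttach start (prev + 1) (jt ++ "\n" ++ txt) F := by
  cases F with
  | nil => simp [pvStepB, pvAttach]
  | cons hd r =>
    obtain ⟨a, b, t⟩ := hd
    by_cases ha : a = prev + 1 + 1
    · simp [pvStepB, pvAttach, ha, String.append_assoc]
    · simp [pvStepB, pvAttach, ha]

theorem pvAttach_new (start prev sid : Int) (jt txt : String) (F : List (Int × Int × String))
    (h : ¬sid = prev + 1) :
    pvAttach start prev jt (pvStepB sid txt F) = (start, prev, jt) :: pvAttach sid sid txt F := by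
  cases F with
  | nil => simp [pvStepB, pvAttach, h]
  | cons hd r =>
    obtain ⟨a, b, t⟩ := hd
    by_cases ha : a = sid + 1
    · simp [pvStepB, pvAttach, ha, h]
    · simp [pvStepB, pvAttach, ha, h]

theorem pvGoA_eq (rest : List (Int × String)) :
    ∀ (segs : List (Int × Int × String)) (start prev : Int) (texts : List String), texts ≠ [] →
    pvGoA segs start prev texts rest =
      segs ++ pvAttach start prev (pvJoinNL texts)
        (rest.foldr (fun c segs => pvStepB c.1 c.2 segs) []) := by
  induction rest with
  | nil =>
    intro segs start prev texts _
    simp [pvGoA, pvAttach]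
  | cons c rest ih =>
    obtain ⟨sid, txt⟩ := c
    intro segs start prev texts h
    simp only [pvGoA, List.foldr_cons]
    by_cases hcons : sid = prev + 1
    · rw [if_pos hcons, ih _ _ _ _ (by simp), pvJoinNL_append _ _ h]
      subst hcons
      rw [pvAttach_merge]
    · rw [if_neg hcons, ih _ _ _ _ (by simp), pvJoinNL_singleton,
        pvAttach_new _ _ _ _ _ _ hcons, List.append_assoc]
      rfl

-- ===== VERDICT (by name: the statement is the Claim_ definition above) =====
theorem merge_interpretation_segments_spec : Claim_equal_merge_interpretation_segments := by
  intro cells _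
  unfold Spec_merge_interpretation_segments merge_interpretation_segments merge_interpretation_segments_alt
  by_cases hc : cells = []
  · subst hc; rfl
  · simp only [if_neg hc]
    rcases hs : PySem.List.sorted cells (fun x => x.1) false with _ | ⟨⟨id0, t0⟩, rest⟩
    · simp
    · show pvGoA [] id0 id0 [t0] rest = _
      rw [pvGoA_eq rest [] id0 id0 [t0] (by simp), pvJoinNL_singleton, List.foldr_cons,
        pvStepB_eq_attach]
      simp
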